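-- pv_equiv track=rewrite | github.com/Mrdrakert/chessbot | opening_parser.py | filter_move_sequences
-- ===== SOURCE A (Python) =====
-- def filter_move_sequences(move_sequences):
--     filtered_sequences = []
--     seen = set()  # Keep track of seen move sequences
--     # Sort the move sequences so that the shorter ones are at the end
--     sorted_sequences = sorted(move_sequences, key=len, reverse=True)
--     for moves in sorted_sequences:
--         # Check if a longer counterpart of the move sequence has been seen before
--         if not any(tuple(ms) in seen for ms in [moves[i:] for i in range(len(moves))]):
--             filtered_sequences.append(moves)
--             seen.update(tuple(moves) for moves in [moves[i:] for i in range(len(moves))])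
--     return filtered_sequences
-- ===== SOURCE B (Python) =====
-- def filter_move_sequences(move_sequences):
--     # A suffix of a kept sequence is in A's "seen" iff its last move equals the
--     # last move of some kept sequence, so only the last move needs tracking.
--     result = []
--     seen_last = set()
--     for moves in sorted(move_sequences, key=len, reverse=True):
--         if not moves:
--             result.append(moves)
--         elif moves[-1] not in seen_last:
--             result.append(moves)
--             seen_last.add(moves[-1])
--     return result
-- ===== Notes on version B (the rewrite author's own statement) =====
-- stated objective: faster
-- what changed: Instead of hashing every suffix of every sequence into a seen-set and scanning all suffixes per candidate, B tracks only the set of last moves of kept sequences (a suffix is seen iff its last move is), testing one element per sequence.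
import Mathlib
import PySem

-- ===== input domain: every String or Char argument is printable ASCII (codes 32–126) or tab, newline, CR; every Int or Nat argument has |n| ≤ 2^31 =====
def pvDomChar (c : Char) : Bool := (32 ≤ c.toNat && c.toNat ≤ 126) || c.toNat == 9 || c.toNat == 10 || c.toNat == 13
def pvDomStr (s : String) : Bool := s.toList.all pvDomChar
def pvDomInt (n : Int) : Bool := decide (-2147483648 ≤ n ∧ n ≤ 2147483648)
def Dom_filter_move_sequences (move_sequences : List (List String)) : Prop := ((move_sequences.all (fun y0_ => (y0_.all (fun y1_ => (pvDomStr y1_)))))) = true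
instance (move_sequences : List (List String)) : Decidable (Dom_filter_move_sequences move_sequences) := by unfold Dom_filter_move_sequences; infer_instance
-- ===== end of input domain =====

-- B replaces A's per-sequence scan over all suffixes (and its set of all suffixes of
-- kept sequences) by a set of last moves only: a suffix is seen iff its last move is.

-- ===== PORT A =====
-- [moves[i:] for i in range(len(moves))]
def pvSuffixesA (moves : List String) : List (List String) :=
  (PySem.List.pyRange 0 (moves.length : Int) 1).map (fun i => PySem.List.slice moves (some i) none)

def pvStepA (st : List (List String) × PySem.Set (List String)) (moves : List String) :
    List (List String) × PySem.Set (List String) :=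
  if (pvSuffixesA moves).any (fun ms => PySem.Set.contains st.2 ms) then st
  else (st.1 ++ [moves], PySem.Set.update st.2 (pvSuffixesA moves))

def filter_move_sequences (move_sequences : List (List String)) : List (List String) :=
  ((PySem.List.sorted move_sequences (fun ms => (ms.length : Int)) true).foldl pvStepA
    ([], PySem.Set.empty)).1

-- ===== PORT B =====
def pvStepB (st : List (List String) × PySem.Set String) (moves : List String) :
    List (List String) × PySem.Set String :=
  match moves.getLast? with
  | none => (st.1 ++ [moves], st.2)           -- empty sequence: always kept
  | some last =>
      if PySem.Set.contains st.2 last then st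
      else (st.1 ++ [moves], PySem.Set.add st.2 last)

def filter_move_sequences_alt (move_sequences : List (List String)) : List (List String) :=
  ((PySem.List.sorted move_sequences (fun ms => (ms.length : Int)) true).foldl pvStepB
    ([], PySem.Set.empty)).1

-- ===== PRECONDITION & SPEC =====
def Spec_filter_move_sequences (move_sequences : List (List String)) (out : List (List String)) : Prop := out = filter_move_sequences_alt move_sequences
instance (move_sequences : List (List String)) (out : List (List String)) : Decidable (Spec_filter_move_sequences move_sequences out) := by unfold Spec_filter_move_sequences; infer_instance

-- ===== CLAIM (what is proved, stated in full; the proofs are below) =====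
def Claim_equal_filter_move_sequences : Prop := ∀ (move_sequences : List (List String)), Dom_filter_move_sequences move_sequences → Spec_filter_move_sequences move_sequences (filter_move_sequences move_sequences)

-- ===== LEMMAS AND PROOFS =====

-- relation between A's set of suffixes and B's set of last moves
def pvInv (sA : PySem.Set (List String)) (sB : PySem.Set String) : Prop :=
  (∀ x : String, [x] ∈ sA ↔ x ∈ sB) ∧
  (∀ s ∈ sA, ∃ x, s.getLast? = some x ∧ [x] ∈ sA)

theorem pvSuffixesA_eq (moves : List String) :
    pvSuffixesA moves = (List.range moves.length).map (fun k => moves.drop k) := by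
  simp [pvSuffixesA, PySem.List.pyRange_one, List.map_map, Function.comp]

theorem pv_getLast?_drop {α : Type} (l : List α) (k : Nat) (h : k < l.length) :
    (l.drop k).getLast? = l.getLast? := by
  induction l generalizing k with
  | nil => simp at h
  | cons a t ih =>
    cases k with
    | zero => rfl
    | succ k =>
      simp only [List.drop_succ_cons]
      rw [ih k (by simpa using h)]
      cases t with
      | nil => simp at h
      | cons b u => rfl

theorem pv_drop_pred {α : Type} (l : List α) (x : α) (h : l.getLast? = some x) :
    l.drop (l.length - 1) = [x] := by
  induction l with
  | nil => simp at h
  | cons a t ih =>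
    cases t with
    | nil => simp at h; simp [h]
    | cons b u =>
      have := ih (by simpa using h)
      simpa using this

theorem pv_mem_suffixes (moves s : List String) :
    s ∈ pvSuffixesA moves ↔ ∃ k, k < moves.length ∧ s = moves.drop k := by
  rw [pvSuffixesA_eq]
  simp [List.mem_map, eq_comm, List.mem_range]

theorem pv_singleton_mem_suffixes (moves : List String) (y : String) :
    [y] ∈ pvSuffixesA moves ↔ moves.getLast? = some y := by
  rw [pv_mem_suffixes]
  constructor
  · rintro ⟨k, hk, hs⟩
    have h1 : (moves.drop k).getLast? = moves.getLast? := pv_getLast?_drop moves k hk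
    rw [← hs] at h1
    simpa using h1.symm
  · intro h
    have hne : moves ≠ [] := by intro he; rw [he] at h; simp at h
    have hlen : 0 < moves.length := List.length_pos_iff.mpr hne
    exact ⟨moves.length - 1, by omega, (pv_drop_pred moves y h).symm⟩

theorem pv_cond_iff (sA : PySem.Set (List String)) (sB : PySem.Set String)
    (hInv : pvInv sA sB) (moves : List String) (x : String) (hx : moves.getLast? = some x) :
    ((pvSuffixesA moves).any (fun ms => PySem.Set.contains sA ms) = true) ↔ x ∈ sB := by
  rw [List.any_eq_true]
  constructor
  · rintro ⟨ms, hms, hc⟩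
    have hmem : ms ∈ sA := (PySem.Set.contains_iff _ _).mp hc
    obtain ⟨y, hy, hys⟩ := hInv.2 ms hmem
    obtain ⟨k, hk, rfl⟩ := (pv_mem_suffixes moves ms).mp hms
    rw [pv_getLast?_drop moves k hk, hx] at hy
    obtain rfl : x = y := by injection hy
    exact (hInv.1 x).mp hys
  · intro hxB
    refine ⟨[x], (pv_singleton_mem_suffixes moves x).mpr hx, ?_⟩
    exact (PySem.Set.contains_iff _ _).mpr ((hInv.1 x).mpr hxB)

theorem pv_inv_step (sA : PySem.Set (List String)) (sB : PySem.Set String)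
    (hInv : pvInv sA sB) (moves : List String) (x : String) (hx : moves.getLast? = some x) :
    pvInv (PySem.Set.update sA (pvSuffixesA moves)) (PySem.Set.add sB x) := by
  constructor
  · intro y
    rw [PySem.Set.mem_update, PySem.Set.mem_add, pv_singleton_mem_suffixes, hx, hInv.1 y]
    constructor
    · rintro (h | h)
      · exact Or.inl h
      · exact Or.inr (by injection h.symm)
    · rintro (h | rfl)
      · exact Or.inl h
      · exact Or.inr rfl
  · intro s hs
    rcases (PySem.Set.mem_update _ _ _).mp hs with h | h
    · obtain ⟨y, hy, hys⟩ := hInv.2 s h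
      exact ⟨y, hy, (PySem.Set.mem_update _ _ _).mpr (Or.inl hys)⟩
    · obtain ⟨k, hk, rfl⟩ := (pv_mem_suffixes moves s).mp h
      refine ⟨x, by rw [pv_getLast?_drop moves k hk, hx], ?_⟩
      exact (PySem.Set.mem_update _ _ _).mpr (Or.inr ((pv_singleton_mem_suffixes moves x).mpr hx))

theorem pv_fold_eq (l : List (List String)) :
    ∀ (acc : List (List String)) (sA : PySem.Set (List String)) (sB : PySem.Set String),
    pvInv sA sB →
    (l.foldl pvStepA (acc, sA)).1 = (l.foldl pvStepB (acc, sB)).1 := by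
  induction l with
  | nil => intro acc sA sB _; rfl
  | cons moves l ih =>
    intro acc sA sB hInv
    simp only [List.foldl_cons]
    cases hx : moves.getLast? with
    | none =>
      have hmoves : moves = [] := by
        cases moves with
        | nil => rfl
        | cons a t => simp [List.getLast?_cons] at hx
      subst hmoves
      have hA : pvStepA (acc, sA) [] = (acc ++ [[]], sA) := by
        simp [pvStepA, pvSuffixesA, PySem.List.pyRange]
      have hB : pvStepB (acc, sB) [] = (acc ++ [[]], sB) := by
        simp [pvStepB]
      rw [hA, hB]; exact ih _ _ _ hInv
    | some x =>
      have hB : pvStepB (acc, sB) moves =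
          (if PySem.Set.contains sB x then (acc, sB)
           else (acc ++ [moves], PySem.Set.add sB x)) := by
        simp [pvStepB, hx]
      by_cases hxB : x ∈ sB
      · have hA : pvStepA (acc, sA) moves = (acc, sA) := by
          simp only [pvStepA]
          rw [if_pos ((pv_cond_iff sA sB hInv moves x hx).mpr hxB)]
        rw [hA, hB, if_pos ((PySem.Set.contains_iff _ _).mpr hxB)]
        exact ih _ _ _ hInv
      · have hA : pvStepA (acc, sA) moves =
            (acc ++ [moves], PySem.Set.update sA (pvSuffixesA moves)) := by
          simp only [pvStepA]
          rw [if_neg (by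
            intro hc; exact hxB ((pv_cond_iff sA sB hInv moves x hx).mp hc))]
        rw [hA, hB, if_neg (by
          intro hc; exact hxB ((PySem.Set.contains_iff _ _).mp hc))]
        exact ih _ _ _ (pv_inv_step sA sB hInv moves x hx)

-- ===== VERDICT (by name: the statement is the Claim_ definition above) =====
theorem filter_move_sequences_spec : Claim_equal_filter_move_sequences := by
  intro ms _
  unfold Spec_filter_move_sequences filter_move_sequences filter_move_sequences_alt
  exact pv_fold_eq _ _ _ _ ⟨fun x => by simp [PySem.Set.empty], fun s hs => by simp [PySem.Set.empty] at hs⟩
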